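-- pv_equiv track=rewrite | github.com/TheFenrisLycaon/DSA-C-- | companies/Triogy/a.py | solve
-- ===== SOURCE A (Python) =====
-- def solve(A):
--     x = 1
--     day = 0
--     B = sorted(A)
--     n = len(A)
--     for i in range(0, n):
--         if B[i] % x == 0:
--             day += B[i] // x
--         else:
--             z = (B[i] + x) // x
--             for j in range(i, n):
--                 if B[j] == z * x:
--                     temp = B[i]
--                     B[i] = B[j]
--                     B[j] = temp
--                     break
--             day += z
--         x += 1
--     return day
-- ===== SOURCE B (Python) =====
-- def solve(A):
--     # Consume the sorted list head-by-head; a swap in A is equivalent to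
--     # replacing the first matching element of the tail with the old head.
--     day = 0
--     x = 1
--     lst = sorted(A)
--     while lst:
--         h, rest = lst[0], lst[1:]
--         if h % x == 0:
--             day += h // x
--         else:
--             z = (h + x) // x
--             try:
--                 rest[rest.index(z * x)] = h
--             except ValueError:
--                 pass
--             day += z
--         lst = rest
--         x += 1
--     return day
-- ===== Notes on version B (the rewrite author's own statement) =====
-- stated objective: alternative
-- what changed: Replaced A's index-based outer loop with in-place swaps and a hand-written inner index scan over the array by a list-consumption pass: take the head of the remaining sorted list each step and, when the head is not divisible, replace the first occurrence of z*x in the tail with the head via list.index.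
import Mathlib
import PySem

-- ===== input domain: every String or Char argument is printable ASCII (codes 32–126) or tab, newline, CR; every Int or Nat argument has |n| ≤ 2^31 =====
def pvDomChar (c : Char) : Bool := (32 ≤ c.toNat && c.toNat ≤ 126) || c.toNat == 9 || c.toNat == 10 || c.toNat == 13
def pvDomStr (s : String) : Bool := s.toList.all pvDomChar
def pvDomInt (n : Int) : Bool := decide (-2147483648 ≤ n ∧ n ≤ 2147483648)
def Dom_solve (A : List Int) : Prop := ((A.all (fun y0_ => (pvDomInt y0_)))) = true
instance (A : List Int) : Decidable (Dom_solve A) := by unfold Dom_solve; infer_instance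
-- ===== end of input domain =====

-- B consumes the sorted list head-by-head and replaces the first matching tail element
-- instead of A's index loop with in-place swaps: an alternative decomposition, same cost.

-- ===== PORT A =====
-- inner loop: for j in range(i, n): if B[j] == zx: swap B[i],B[j]; break
def solveInner (B : List Int) (i zx : Int) : List Int → List Int
  | [] => B
  | j :: js =>
    if PySem.List.pyGetD B j 0 == zx then
      let temp := PySem.List.pyGetD B i 0
      let B1 := PySem.List.pySetD B i (PySem.List.pyGetD B j 0)
      PySem.List.pySetD B1 j temp
    else solveInner B i zx js

-- one outer-loop iteration, state (B, day, x)
def solveStep (n : Int) (st : List Int × Int × Int) (i : Int) : List Int × Int × Int :=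
  let B := st.1; let day := st.2.1; let x := st.2.2
  if PySem.Int.mod (PySem.List.pyGetD B i 0) x == 0 then
    (B, day + PySem.Int.floordiv (PySem.List.pyGetD B i 0) x, x + 1)
  else
    let z := PySem.Int.floordiv (PySem.List.pyGetD B i 0 + x) x
    let B' := solveInner B i (z * x) (PySem.List.pyRange i n 1)
    (B', day + z, x + 1)

def solve (A : List Int) : Int :=
  let B := PySem.List.sorted A (fun y => y) false
  let n : Int := A.length
  ((PySem.List.pyRange 0 n 1).foldl (solveStep n) (B, 0, 1)).2.1

-- ===== PORT B =====
-- replace the first occurrence of zx in rest by h (rest.index + assignment; no-op if absent)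
def replaceFirst (rest : List Int) (zx h : Int) : List Int :=
  match PySem.List.index? rest zx with
  | some k => rest.set k h
  | none => rest

theorem length_replaceFirst (rest : List Int) (zx h : Int) :
    (replaceFirst rest zx h).length = rest.length := by
  unfold replaceFirst; cases PySem.List.index? rest zx <;> simp

def solveGo : List Int → Int → Int → Int
  | [], _, day => day
  | h :: rest, x, day =>
    if PySem.Int.mod h x == 0 then
      solveGo rest (x + 1) (day + PySem.Int.floordiv h x)
    else
      let z := PySem.Int.floordiv (h + x) x
      solveGo (replaceFirst rest (z * x) h) (x + 1) (day + z)
termination_by l _ _ => l.length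
decreasing_by
  · simp
  · simp [length_replaceFirst]

def solve_alt (A : List Int) : Int :=
  solveGo (PySem.List.sorted A (fun y => y) false) 1 0

-- ===== PRECONDITION & SPEC =====
def Spec_solve (A : List Int) (out : Int) : Prop := out = solve_alt A
instance (A : List Int) (out : Int) : Decidable (Spec_solve A out) := by unfold Spec_solve; infer_instance

-- ===== CLAIM (what is proved, stated in full; the proofs are below) =====
def Claim_equal_solve : Prop := ∀ (A : List Int), Dom_solve A → Spec_solve A (solve A)

-- ===== LEMMAS AND PROOFS =====

-- small list facts used throughout
theorem getD_append_len (pre t : List Int) (x d : Int) :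
    (pre ++ x :: t).getD pre.length d = x := by simp

theorem getD_append_lt (pre t : List Int) (i : Nat) (d : Int) (h : i < pre.length) :
    (pre ++ t).getD i d = pre.getD i d := by
  simp [List.getD_eq_getElem?_getD, List.getElem?_append_left h]

theorem set_append_lt (pre t : List Int) (i : Nat) (v : Int) (h : i < pre.length) :
    (pre ++ t).set i v = pre.set i v ++ t := by rw [List.set_append_left _ _ h]

theorem set_append_len (pre t : List Int) (x v : Int) :
    (pre ++ x :: t).set pre.length v = pre ++ v :: t := by simp

-- A's inner scan-and-swap, started past position i, equals replace-first on the tail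
theorem inner_eq (rest : List Int) : ∀ (pre : List Int) (i : Nat) (zx : Int), i < pre.length →
    solveInner (pre ++ rest) (i : Int) zx
      (PySem.List.pyRange (pre.length : Int) ((pre.length : Int) + (rest.length : Int)) 1) =
    match PySem.List.index? rest zx with
    | some k => (pre.set i zx) ++ rest.set k (pre.getD i 0)
    | none => pre ++ rest := by
  induction rest with
  | nil =>
    intro pre i zx hi
    rw [show ((pre.length : Int) + ((([] : List Int).length : Nat) : Int)) = (pre.length : Int)
      by simp]
    rw [PySem.List.pyRange_one_eq_nil le_rfl]
    simp [solveInner, PySem.List.index?]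
  | cons r t ih =>
    intro pre i zx hi
    rw [PySem.List.pyRange_one_cons (by push_cast [List.length_cons]; omega)]
    by_cases hr : r = zx
    · subst hr
      simp only [solveInner, PySem.List.pyGetD_natCast, getD_append_len, beq_self_eq_true,
        if_true, PySem.List.pySetD_natCast]
      rw [getD_append_lt pre (r :: t) i 0 hi, set_append_lt pre (r :: t) i r hi]
      rw [show pre.length = (pre.set i r).length by simp]
      rw [set_append_len]
      rw [PySem.List.index?_cons_self]
      simp
    · simp only [solveInner, PySem.List.pyGetD_natCast, getD_append_len]
      rw [if_neg (by simpa using hr)]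
      have h2 : ((pre.length : Int) + 1) = (((pre ++ [r]).length : Nat) : Int) := by simp
      have h3 : ((pre.length : Int) + (((r :: t).length : Nat) : Int)) =
          (((pre ++ [r]).length : Nat) : Int) + ((t.length : Nat) : Int) := by
        push_cast [List.length_append, List.length_cons, List.length_nil]; ring
      rw [show pre ++ r :: t = (pre ++ [r]) ++ t by simp, h2, h3]
      rw [ih (pre ++ [r]) i zx (by simp; omega)]
      rw [PySem.List.index?_cons_of_ne _ hr]
      cases hidx : PySem.List.index? t zx with
      | none => simp
      | some k =>
        simp only [Option.map_some]
        rw [set_append_lt pre [r] i zx hi, getD_append_lt pre [r] i 0 hi]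
        simp

-- the outer loop over indices i with array state equals B's list-consumption recursion
-- (induction on the suffix length, since the step rewrites the tail in place)
theorem main_eq (n : Nat) : ∀ (suffix : List Int), suffix.length = n →
    ∀ (pre : List Int) (day x : Int),
    ((PySem.List.pyRange (pre.length : Int)
        ((pre.length : Int) + (suffix.length : Int)) 1).foldl
      (solveStep ((pre.length : Int) + (suffix.length : Int))) (pre ++ suffix, day, x)).2.1
    = solveGo suffix x day := by
  induction n with
  | zero =>
    intro suffix hlen pre day x
    rw [List.length_eq_zero_iff.mp hlen]
    rw [show ((pre.length : Int) + ((([] : List Int).length : Nat) : Int)) = (pre.length : Int)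
      by simp]
    rw [PySem.List.pyRange_one_eq_nil le_rfl]
    simp [solveGo]
  | succ m ihn =>
    intro suffix hlen pre day x
    obtain ⟨h, rest, rfl⟩ : ∃ a l, suffix = a :: l := by
      cases suffix with
      | nil => simp at hlen
      | cons a l => exact ⟨a, l, rfl⟩
    have hrlen : rest.length = m := by simpa using hlen
    rw [PySem.List.pyRange_one_cons (by push_cast [List.length_cons]; omega)]
    rw [List.foldl_cons]
    have hget : PySem.List.pyGetD (pre ++ h :: rest) (pre.length : Int) 0 = h := by
      simp only [PySem.List.pyGetD_natCast, getD_append_len]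
    by_cases hmod : PySem.Int.mod h x = 0
    · -- divisible branch
      have h2 : ((pre.length : Int) + 1) = (((pre ++ [h]).length : Nat) : Int) := by simp
      have h3 : ((pre.length : Int) + (((h :: rest).length : Nat) : Int)) =
          (((pre ++ [h]).length : Nat) : Int) + ((rest.length : Nat) : Int) := by
        push_cast [List.length_append, List.length_cons, List.length_nil]; ring
      rw [show solveStep ((pre.length : Int) + (((h :: rest).length : Nat) : Int))
            (pre ++ h :: rest, day, x) (pre.length : Int)
          = (pre ++ h :: rest, day + PySem.Int.floordiv h x, x + 1) by
        simp [solveStep, hget, hmod]]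
      rw [show pre ++ h :: rest = (pre ++ [h]) ++ rest by simp, h2, h3]
      rw [ihn rest hrlen (pre ++ [h]) (day + PySem.Int.floordiv h x) (x + 1)]
      rw [solveGo]
      rw [if_pos (by simpa using hmod)]
    · -- swap branch
      have hne : h ≠ PySem.Int.floordiv (h + x) x * x := by
        intro he
        exact hmod (by
          rw [PySem.Int.mod_eq_zero_iff_dvd]
          exact ⟨PySem.Int.floordiv (h + x) x, he.trans (mul_comm _ _)⟩)
      have hinner : ∃ w : Int, solveInner (pre ++ h :: rest) (pre.length : Int)
            (PySem.Int.floordiv (h + x) x * x)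
            (PySem.List.pyRange (pre.length : Int)
              ((pre.length : Int) + (((h :: rest).length : Nat) : Int)) 1)
          = (pre ++ [w]) ++ replaceFirst rest (PySem.Int.floordiv (h + x) x * x) h := by
        have hstep : solveInner (pre ++ h :: rest) (pre.length : Int)
              (PySem.Int.floordiv (h + x) x * x)
              (PySem.List.pyRange (pre.length : Int)
                ((pre.length : Int) + (((h :: rest).length : Nat) : Int)) 1)
            = (match PySem.List.index? rest (PySem.Int.floordiv (h + x) x * x) with
               | some k => ((pre ++ [h]).set (pre ++ [h]).length.pred
                   (PySem.Int.floordiv (h + x) x * x))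
                   ++ rest.set k ((pre ++ [h]).getD (pre ++ [h]).length.pred 0)
               | none => (pre ++ [h]) ++ rest) := by
          rw [PySem.List.pyRange_one_cons (by push_cast [List.length_cons]; omega)]
          show solveInner (pre ++ h :: rest) ((pre.length : Nat) : Int) _ _ = _
          simp only [solveInner, PySem.List.pyGetD_natCast, getD_append_len]
          rw [if_neg (by simpa using hne)]
          have h2 : ((pre.length : Int) + 1) = (((pre ++ [h]).length : Nat) : Int) := by simp
          have h3 : ((pre.length : Int) + (((h :: rest).length : Nat) : Int)) =
              (((pre ++ [h]).length : Nat) : Int) + ((rest.length : Nat) : Int) := by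
            push_cast [List.length_append, List.length_cons, List.length_nil]; ring
          rw [show pre ++ h :: rest = (pre ++ [h]) ++ rest by simp, h2, h3]
          have := inner_eq rest (pre ++ [h]) (pre ++ [h]).length.pred
            (PySem.Int.floordiv (h + x) x * x) (by simp)
          rw [show (((pre ++ [h]).length.pred : Nat) : Int) = ((pre.length : Nat) : Int)
            by simp] at this
          exact this
        cases hidx : PySem.List.index? rest (PySem.Int.floordiv (h + x) x * x) with
        | none =>
          refine ⟨h, ?_⟩
          rw [hstep, hidx]
          rw [PySem.List.index?_eq_idxOf?] at hidx
          simp [replaceFirst, hidx]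
        | some k =>
          refine ⟨PySem.Int.floordiv (h + x) x * x, ?_⟩
          rw [hstep, hidx]
          have hpred : (pre ++ [h]).length.pred = pre.length := by simp
          rw [hpred, set_append_len, getD_append_len]
          rw [PySem.List.index?_eq_idxOf?] at hidx
          simp [replaceFirst, hidx]
      obtain ⟨w, hw⟩ := hinner
      rw [show solveStep ((pre.length : Int) + (((h :: rest).length : Nat) : Int))
            (pre ++ h :: rest, day, x) (pre.length : Int)
          = (solveInner (pre ++ h :: rest) (pre.length : Int)
              (PySem.Int.floordiv (h + x) x * x)
              (PySem.List.pyRange (pre.length : Int)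
                ((pre.length : Int) + (((h :: rest).length : Nat) : Int)) 1),
             day + PySem.Int.floordiv (h + x) x, x + 1) by
        simp only [solveStep, hget]
        rw [if_neg (by simpa using hmod)]]
      rw [hw]
      have h2w : ((pre.length : Int) + 1) = (((pre ++ [w]).length : Nat) : Int) := by simp
      have h3w : ((pre.length : Int) + (((h :: rest).length : Nat) : Int)) =
          (((pre ++ [w]).length : Nat) : Int)
            + (((replaceFirst rest (PySem.Int.floordiv (h + x) x * x) h).length : Nat) : Int) := by
        push_cast [List.length_append, List.length_cons, List.length_nil, length_replaceFirst]
        ring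
      rw [h2w, h3w]
      rw [ihn (replaceFirst rest (PySem.Int.floordiv (h + x) x * x) h)
            (by rw [length_replaceFirst]; exact hrlen)
            (pre ++ [w]) (day + PySem.Int.floordiv (h + x) x) (x + 1)]
      rw [solveGo]
      rw [if_neg (by simpa using hmod)]

-- ===== VERDICT (by name: the statement is the Claim_ definition above) =====
theorem solve_spec : Claim_equal_solve := by
  intro A _
  have h := main_eq (PySem.List.sorted A (fun y => y) false).length
    (PySem.List.sorted A (fun y => y) false) rfl [] 0 1
  simp only [List.length_nil, List.nil_append, Nat.cast_zero, zero_add] at h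
  have hlen : (PySem.List.sorted A (fun y => y) false).length = A.length :=
    PySem.List.length_sorted A _ _
  show solve A = solve_alt A
  simp only [solve, solve_alt, ← hlen]
  exact h
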